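-- pv_equiv track=rewrite | github.com/UlsanCollege-English/week-2-assignment-4-service-queue-jn-oli | src/queueops.py | move_to_back
-- ===== SOURCE A (Python) =====
-- from typing import List, Tuple, Optional
--
-- def move_to_back(queue: List[str], name: str) -> List[str]:
--     """
--     Move the first occurrence of `name` to the back of the queue.
--     If `name` is not in the queue, return the queue unchanged.
--     """
--     if name not in queue:
--         return queue[:]  # unchanged copy
--
--     new_queue = []
--     moved = False
--     for person in queue:
--         if person == name and not moved:
--             moved = True  # skip first occurrence
--             continue
--         new_queue.append(person)
--
--     new_queue.append(name)
--     return new_queue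
-- ===== SOURCE B (Python) =====
-- def move_to_back(queue, name):
--     """Move the first occurrence of `name` to the back; unchanged copy if absent."""
--     if name not in queue:
--         return queue[:]
--     i = queue.index(name)
--     return queue[:i] + queue[i+1:] + [name]
-- ===== Notes on version B (the rewrite author's own statement) =====
-- stated objective: simpler
-- what changed: Replaces the per-element loop with a moved flag by a single index lookup and slice concatenation queue[:i] + queue[i+1:] + [name].
import Mathlib
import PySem

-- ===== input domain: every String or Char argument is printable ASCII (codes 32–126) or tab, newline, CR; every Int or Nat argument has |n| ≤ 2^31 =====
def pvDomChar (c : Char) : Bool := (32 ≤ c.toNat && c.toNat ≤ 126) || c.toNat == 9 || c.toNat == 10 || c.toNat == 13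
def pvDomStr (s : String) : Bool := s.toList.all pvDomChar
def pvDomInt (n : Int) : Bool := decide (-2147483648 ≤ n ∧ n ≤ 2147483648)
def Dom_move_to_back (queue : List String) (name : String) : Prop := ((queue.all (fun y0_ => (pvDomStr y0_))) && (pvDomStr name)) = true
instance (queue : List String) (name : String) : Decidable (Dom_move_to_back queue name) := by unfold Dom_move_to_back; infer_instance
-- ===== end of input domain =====

-- B replaces A's per-element loop with a moved flag by one index lookup and slice concatenation (simpler decomposition, same O(n) cost).

-- ===== PORT A =====
def move_to_back (queue : List String) (name : String) : List String :=
  if name ∈ queue then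
    let st := queue.foldl
      (fun (st : List String × Bool) person =>
        if person = name ∧ st.2 = false then (st.1, true)
        else (st.1 ++ [person], st.2)) ([], false)
    st.1 ++ [name]
  else queue

-- ===== PORT B =====
def move_to_back_alt (queue : List String) (name : String) : List String :=
  if name ∈ queue then
    match PySem.List.index? queue name with
    | some i =>
        PySem.List.slice queue none (some (i : Int)) ++
        PySem.List.slice queue (some ((i : Int) + 1)) none ++ [name]
    | none => queue
  else queue

-- ===== PRECONDITION & SPEC =====
def Spec_move_to_back (queue : List String) (name : String) (out : List String) : Prop := out = move_to_back_alt queue name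
instance (queue : List String) (name : String) (out : List String) : Decidable (Spec_move_to_back queue name out) := by unfold Spec_move_to_back; infer_instance

-- ===== CLAIM (what is proved, stated in full; the proofs are below) =====
def Claim_equal_move_to_back : Prop := ∀ (queue : List String) (name : String), Dom_move_to_back queue name → Spec_move_to_back queue name (move_to_back queue name)

-- ===== LEMMAS AND PROOFS =====

-- once moved is true, the loop just appends everything
theorem mtb_fold_true (queue : List String) (name : String) (acc : List String) :
    queue.foldl
      (fun (st : List String × Bool) person =>
        if person = name ∧ st.2 = false then (st.1, true)
        else (st.1 ++ [person], st.2)) (acc, true) = (acc ++ queue, true) := by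
  induction queue generalizing acc with
  | nil => simp
  | cons x xs ih => simp [ih]

-- while moved is false the loop copies; on queue = pre ++ name :: suf with name ∉ pre it yields acc ++ pre ++ suf
theorem mtb_fold_split (pre suf : List String) (name : String) (acc : List String)
    (hpre : name ∉ pre) :
    (pre ++ name :: suf).foldl
      (fun (st : List String × Bool) person =>
        if person = name ∧ st.2 = false then (st.1, true)
        else (st.1 ++ [person], st.2)) (acc, false) = (acc ++ pre ++ suf, true) := by
  induction pre generalizing acc with
  | nil => simp [mtb_fold_true]
  | cons x xs ih =>
    have hx : x ≠ name := fun h => hpre (h ▸ List.mem_cons_self)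
    have hxs : name ∉ xs := fun h => hpre (List.mem_cons_of_mem _ h)
    rw [List.cons_append, List.foldl_cons, if_neg (fun hc => hx hc.1), ih (acc ++ [x]) hxs]
    simp

-- ===== VERDICT (by name: the statement is the Claim_ definition above) =====
theorem move_to_back_spec : Claim_equal_move_to_back := by
  intro queue name _
  unfold Spec_move_to_back move_to_back move_to_back_alt
  by_cases h : name ∈ queue
  · simp only [if_pos h]
    obtain ⟨k, hk⟩ := Option.isSome_iff_exists.mp ((PySem.List.index?_isSome_iff queue name).mpr h)
    obtain ⟨pre, suf, hq, hlen, hpre⟩ := (PySem.List.index?_eq_some_iff queue name k).mp hk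
    subst hq hlen
    have hcast : ((pre.length : Int) + 1) = ((pre.length + 1 : Nat) : Int) := by push_cast; ring
    rw [hk, mtb_fold_split pre suf name [] hpre]
    show ([] ++ pre ++ suf, true).1 ++ [name] =
      PySem.List.slice (pre ++ name :: suf) none (some (pre.length : Int)) ++
      PySem.List.slice (pre ++ name :: suf) (some ((pre.length : Int) + 1)) none ++ [name]
    rw [hcast, PySem.List.slice_to_natCast, PySem.List.slice_from_natCast]
    simp
  · simp [h]
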